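-- pv_equiv track=rewrite | github.com/Likitha-Gedipudi/LinkedIn_Match_Algorithm | src/scrapers/github_scraper.py | _aggregate_languages
-- ===== SOURCE A (Python) =====
-- from typing import Any, Dict, List, Optional
--
-- def _aggregate_languages(repos: List[Dict]) -> List[str]:
--     """Aggregate and rank programming languages from repositories."""
--     language_counts = {}
--
--     for repo in repos:
--         lang = repo.get("language")
--         if lang:
--             language_counts[lang] = language_counts.get(lang, 0) + 1
--
--     # Sort by frequency
--     sorted_languages = sorted(
--         language_counts.items(),
--         key=lambda x: x[1],
--         reverse=True
--     )
--
--     return [lang for lang, _ in sorted_languages]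
-- ===== SOURCE B (Python) =====
-- def _aggregate_languages(repos):
--     """Aggregate and rank programming languages from repositories."""
--     language_counts = {}
--
--     for repo in repos:
--         lang = repo.get("language")
--         if lang:
--             language_counts[lang] = language_counts.get(lang, 0) + 1
--
--     if not language_counts:
--         return []
--
--     # Bucket the languages by their count, then read the buckets out from
--     # the highest count down -- no comparison sort needed.
--     max_count = max(language_counts.values())
--     buckets = {}
--     for lang, n in language_counts.items():
--         buckets.setdefault(n, []).append(lang)
--
--     result = []
--     for c in range(max_count, 0, -1):
--         result.extend(buckets.get(c, []))
--     return result
-- ===== Notes on version B (the rewrite author's own statement) =====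
-- stated objective: alternative
-- what changed: The ranking phase no longer calls sorted(): B buckets the languages by their count into a dict and reads the buckets out from max_count down to 1, reproducing the stable frequency-descending order without a comparison sort.
import Mathlib
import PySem

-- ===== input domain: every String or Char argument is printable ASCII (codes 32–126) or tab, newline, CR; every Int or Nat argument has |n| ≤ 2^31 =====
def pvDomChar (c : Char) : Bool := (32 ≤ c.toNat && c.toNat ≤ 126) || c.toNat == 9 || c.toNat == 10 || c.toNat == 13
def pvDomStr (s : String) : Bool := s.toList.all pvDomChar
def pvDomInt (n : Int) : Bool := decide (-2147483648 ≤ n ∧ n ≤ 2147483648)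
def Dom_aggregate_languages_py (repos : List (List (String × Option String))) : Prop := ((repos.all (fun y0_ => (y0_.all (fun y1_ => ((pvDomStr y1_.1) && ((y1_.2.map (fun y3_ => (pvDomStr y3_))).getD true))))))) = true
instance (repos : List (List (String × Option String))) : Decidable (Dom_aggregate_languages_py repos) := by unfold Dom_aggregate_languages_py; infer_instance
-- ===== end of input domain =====

-- ===== PORT A =====
-- B replaces A's final sorted() ranking with a bucket pass over the counts (alternative decomposition; same counting phase).
-- shared counting phase: both Pythons build language_counts with the identical loop
def pvLangCounts (repos : List (List (String × Option String))) : PySem.Dict String Int :=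
  repos.foldl (fun d repo =>
    match (PySem.Dict.mk repo).get? "language" with
    | some (some lang) => if lang ≠ "" then d.insert lang (d.getD lang 0 + 1) else d
    | _ => d) PySem.Dict.empty

def aggregate_languages_py (repos : List (List (String × Option String))) : List String :=
  (PySem.List.sorted (pvLangCounts repos).items (fun x => x.2) true).map (fun p => p.1)

-- ===== PORT B =====
def aggregate_languages_py_alt (repos : List (List (String × Option String))) : List String :=
  let language_counts := pvLangCounts repos
  match PySem.List.max? language_counts.values (fun v => v) with
  | none => []     -- 'if not language_counts: return []'
  | some max_count =>
    let buckets : PySem.Dict Int (List String) :=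
      language_counts.items.foldl (fun b p => b.modify p.2 [] (· ++ [p.1])) PySem.Dict.empty
    (PySem.List.pyRange max_count 0 (-1)).foldl (fun acc c => acc ++ buckets.getD c []) []

-- ===== PRECONDITION & SPEC =====
def Spec_aggregate_languages_py (repos : List (List (String × Option String))) (out : List String) : Prop := out = aggregate_languages_py_alt repos
instance (repos : List (List (String × Option String))) (out : List String) : Decidable (Spec_aggregate_languages_py repos out) := by unfold Spec_aggregate_languages_py; infer_instance

-- ===== CLAIM (what is proved, stated in full; the proofs are below) =====
def Claim_equal_aggregate_languages_py : Prop := ∀ (repos : List (List (String × Option String))), Dom_aggregate_languages_py repos → Spec_aggregate_languages_py repos (aggregate_languages_py repos)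

-- ===== LEMMAS AND PROOFS =====

-- insertBy passes over a prefix it does not go before
theorem insertBy_append_of_not_before {α : Type} (before : α → α → Bool) (x : α)
    (ys zs : List α) (h : ∀ y ∈ ys, before x y = false) :
    PySem.List.insertBy before x (ys ++ zs) = ys ++ PySem.List.insertBy before x zs := by
  induction ys with
  | nil => rfl
  | cons y ys ih =>
    simp only [List.cons_append, PySem.List.insertBy, h y (by simp)]
    simp only [Bool.false_eq_true, if_false, List.cons.injEq, true_and]
    exact ih (fun y hy => h y (by simp [hy]))

-- insertBy lands exactly between the kept prefix and a suffix it goes before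
theorem insertBy_split {α : Type} (before : α → α → Bool) (x : α)
    (ys zs : List α) (h1 : ∀ y ∈ ys, before x y = false) (h2 : ∀ z ∈ zs, before x z = true) :
    PySem.List.insertBy before x (ys ++ zs) = ys ++ x :: zs := by
  rw [insertBy_append_of_not_before before x ys zs h1]
  cases zs with
  | nil => rfl
  | cons z zs => simp [PySem.List.insertBy, h2 z (by simp)]

-- one insertion step of the reverse insertion sort, seen on the bucket decomposition
theorem insertBy_flatMap {α : Type} (key : α → Int) (x : α) (l : List α) (ks : List Int)
    (hks : ks.Pairwise (· > ·)) (hx : key x ∈ ks) :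
    PySem.List.insertBy (fun a b => decide (key b < key a)) x
        (ks.flatMap (fun c => l.filter (fun p => key p == c)))
      = ks.flatMap (fun c => (l ++ [x]).filter (fun p => key p == c)) := by
  induction ks with
  | nil => simp at hx
  | cons c ks ih =>
    have hc : ∀ c' ∈ ks, c' < c := fun c' hc' => (List.pairwise_cons.mp hks).1 c' hc'
    rw [List.flatMap_cons, List.flatMap_cons]
    by_cases hxc : key x = c
    · have h1 : ∀ y ∈ l.filter (fun p => key p == c), (decide (key y < key x)) = false := by
        intro y hy
        have hyc := (List.mem_filter.mp hy).2
        simp only [beq_iff_eq] at hyc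
        simp [hyc, hxc]
      have h2 : ∀ z ∈ ks.flatMap (fun c => l.filter (fun p => key p == c)),
          (decide (key z < key x)) = true := by
        intro z hz
        obtain ⟨c', hc', hzf⟩ := List.mem_flatMap.mp hz
        have hzc := (List.mem_filter.mp hzf).2
        simp only [beq_iff_eq] at hzc
        simp only [hzc, hxc, decide_eq_true_eq]
        exact hc c' hc'
      rw [insertBy_split _ x _ _ h1 h2]
      have hbc : (l ++ [x]).filter (fun p => key p == c) = l.filter (fun p => key p == c) ++ [x] := by
        simp [List.filter_append, hxc]
      have hrest : ks.flatMap (fun c => (l ++ [x]).filter (fun p => key p == c))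
          = ks.flatMap (fun c => l.filter (fun p => key p == c)) := by
        simp only [List.flatMap_def]
        congr 1
        apply List.map_congr_left
        intro c' hc'
        have hne : key x ≠ c' := by have := hc c' hc'; omega
        simp [List.filter_append, hne]
      rw [hbc, hrest]
      simp
    · have hx' : key x ∈ ks := by
        rcases List.mem_cons.mp hx with h | h
        · exact absurd h hxc
        · exact h
      have hxlt : key x < c := hc _ hx'
      have h1 : ∀ y ∈ l.filter (fun p => key p == c), (decide (key y < key x)) = false := by
        intro y hy
        have hyc := (List.mem_filter.mp hy).2
        simp only [beq_iff_eq] at hyc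
        simp only [hyc, decide_eq_false_iff_not, not_lt]
        omega
      rw [insertBy_append_of_not_before _ x _ _ h1, ih hks.of_cons hx']
      have : (l ++ [x]).filter (fun p => key p == c) = l.filter (fun p => key p == c) := by
        simp [List.filter_append, hxc]
      rw [this]

-- stability of Python's reverse sort on Int keys, as a bucket decomposition
theorem sorted_rev_eq_flatMap {α : Type} (key : α → Int) (l : List α) (ks : List Int)
    (hks : ks.Pairwise (· > ·)) (hmem : ∀ p ∈ l, key p ∈ ks) :
    PySem.List.sorted l key true = ks.flatMap (fun c => l.filter (fun p => key p == c)) := by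
  rw [PySem.List.sorted_rev_eq_foldl_insertBy]
  induction l using List.reverseRecOn with
  | nil => simp
  | append_singleton l x ih =>
    rw [List.foldl_append, List.foldl_cons, List.foldl_nil,
      ih (fun p hp => hmem p (by simp [hp])),
      insertBy_flatMap key x l ks hks (hmem x (by simp))]

-- membership in the values of an insert
theorem mem_values_insert {κ ν : Type} [BEq κ] (d : PySem.Dict κ ν) (k : κ) (w v : ν)
    (hv : v ∈ (d.insert k w).values) : v = w ∨ v ∈ d.values := by
  simp only [PySem.Dict.insert] at hv
  split at hv
  · simp only [PySem.Dict.values, List.map_map, List.mem_map] at hv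
    obtain ⟨p, hp, hpv⟩ := hv
    simp only [Function.comp] at hpv
    split at hpv
    · left; exact hpv.symm
    · right; exact List.mem_map.mpr ⟨p, hp, hpv⟩
  · simp only [PySem.Dict.values, List.map_append, List.mem_append, List.map_cons] at hv
    rcases hv with h | h
    · right; exact h
    · left; simpa using h

-- getD with default 0 is 0 or an existing value
theorem getD_zero_cases {κ : Type} [BEq κ] (d : PySem.Dict κ Int) (k : κ) :
    d.getD k 0 = 0 ∨ d.getD k 0 ∈ d.values := by
  simp only [PySem.Dict.getD, PySem.Dict.get?]
  cases hf : List.find? (fun p => p.1 == k) d.items with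
  | none => left; rfl
  | some p =>
    right
    simp only [Option.map_some, Option.getD_some, PySem.Dict.values]
    exact List.mem_map.mpr ⟨p, List.mem_of_find?_eq_some hf, rfl⟩

-- every count produced by the counting loop is at least 1
theorem counts_values_pos (repos : List (List (String × Option String))) :
    ∀ v ∈ (pvLangCounts repos).values, 1 ≤ v := by
  unfold pvLangCounts
  suffices h : ∀ (d : PySem.Dict String Int), (∀ v ∈ d.values, 1 ≤ v) →
      ∀ v ∈ (repos.foldl (fun d repo =>
        match (PySem.Dict.mk repo).get? "language" with
        | some (some lang) => if lang ≠ "" then d.insert lang (d.getD lang 0 + 1) else d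
        | _ => d) d).values, 1 ≤ v by
    exact h PySem.Dict.empty (by intro v hv; simp [PySem.Dict.values, PySem.Dict.empty] at hv)
  induction repos with
  | nil => exact fun d hd => hd
  | cons repo repos ih =>
    intro d hd
    rw [List.foldl_cons]
    apply ih
    intro v hv
    split at hv
    · rename_i lang heq
      split at hv
      · rcases mem_values_insert _ _ _ _ hv with h | h
        · rcases getD_zero_cases d lang with h0 | h0
          · omega
          · have := hd _ h0; omega
        · exact hd v h
      · exact hd v hv
    · exact hd v hv

-- the bucket dict read back: bucket c is the c-count slice of the items, in order
theorem buckets_getD (L : List (String × Int)) (c : Int) :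
    (L.foldl (fun b p => b.modify p.2 [] (· ++ [p.1])) PySem.Dict.empty).getD c []
      = (L.filter (fun p => p.2 == c)).map (fun p => p.1) := by
  have h : L.foldl (fun b p => b.modify p.2 [] (· ++ [p.1])) PySem.Dict.empty
      = (L.map (fun p => (p.2, p.1))).foldl (fun b q => b.modify q.1 [] (· ++ [q.2])) PySem.Dict.empty := by
    rw [List.foldl_map]
  rw [h, PySem.Dict.getD_foldl_modify_append]
  simp [List.filter_map, List.map_map, Function.comp_def]

-- ===== VERDICT (by name: the statement is the Claim_ definition above) =====
theorem aggregate_languages_py_spec : Claim_equal_aggregate_languages_py := by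
  intro repos _
  unfold Spec_aggregate_languages_py aggregate_languages_py aggregate_languages_py_alt
  have hpos := counts_values_pos repos
  cases hmax : PySem.List.max? (pvLangCounts repos).values (fun v => v) with
  | none =>
    have hval : (pvLangCounts repos).values = [] := (PySem.List.max?_eq_none_iff _ _).mp hmax
    have hit : (pvLangCounts repos).items = [] := by
      simpa [PySem.Dict.values, List.map_eq_nil_iff] using hval
    simp [hit, hmax, PySem.List.sorted]
  | some m =>
    have hks : (PySem.List.pyRange m 0 (-1)).Pairwise (· > ·) := by
      rw [PySem.List.pyRange_neg_one_eq_reverse, List.pairwise_reverse]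
      exact PySem.List.pairwise_lt_pyRange_one _ _
    have hmem : ∀ p ∈ (pvLangCounts repos).items, p.2 ∈ PySem.List.pyRange m 0 (-1) := by
      intro p hp
      have hv : p.2 ∈ (pvLangCounts repos).values := List.mem_map.mpr ⟨p, hp, rfl⟩
      rw [PySem.List.mem_pyRange_neg_one]
      exact ⟨by have := hpos _ hv; omega, PySem.List.max?_isMax hmax _ hv⟩
    simp only [hmax]
    rw [sorted_rev_eq_flatMap (fun p => p.2) (pvLangCounts repos).items _ hks hmem,
      PySem.List.foldl_append_eq_flatMap]
    simp only [List.map_flatMap, List.nil_append]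
    congr 1
    funext c
    rw [buckets_getD]
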